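-- pv_equiv track=rewrite | github.com/pypi-data/pypi-mirror-99 | packages/vsg/vsg-3.0.0.tar.gz/vsg-3.0.0/vsg/tokens.py | combine_characters_into_words
-- ===== SOURCE A (Python) =====
-- lSingleCharacterSymbols = [',', ':', '(', ')', '\'', '"', '+', '&', '-', '*', '/', '<', '>', ';', '=', '[', ']', '?']
--
-- def combine_characters_into_words(lChars):
--     lReturn = []
--     sTemp = ''
--     for sChar in lChars:
--         if len(sChar) > 1:
--             if sTemp != '':
--                 lReturn.append(sTemp)
--             lReturn.append(sChar)
--             sTemp = ''
--         elif sChar == ' ':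
--             if sTemp != '':
--                 lReturn.append(sTemp)
--             lReturn.append(sChar)
--             sTemp = ''
--         elif sChar in lSingleCharacterSymbols:
--             if sTemp != '':
--                 lReturn.append(sTemp)
--             lReturn.append(sChar)
--             sTemp = ''
--         else:
--             sTemp += sChar
--
--     if len(sTemp) != 0:
--         lReturn.append(sTemp)
--
--     return lReturn
-- ===== SOURCE B (Python) =====
-- lSingleCharacterSymbols = [',', ':', '(', ')', '\'', '"', '+', '&', '-', '*', '/', '<', '>', ';', '=', '[', ']', '?']
--
-- _DELIMS = set(lSingleCharacterSymbols)
--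
--
-- def _is_delim(sChar):
--     return len(sChar) > 1 or sChar == ' ' or sChar in _DELIMS
--
--
-- def combine_characters_into_words(lChars):
--     out = []
--     i, n = 0, len(lChars)
--     while i < n:
--         if _is_delim(lChars[i]):
--             out.append(lChars[i])
--             i += 1
--         else:
--             j = i
--             while j < n and not _is_delim(lChars[j]):
--                 j += 1
--             word = ''.join(lChars[i:j])
--             if word:
--                 out.append(word)
--             i = j
--     return out
-- ===== Notes on version B (the rewrite author's own statement) =====
-- stated objective: idiomatic
-- what changed: Replaces A's character-accumulator-with-flush state machine by a two-pointer run scanner: each maximal run of non-delimiter characters is located with an inner scan and joined into one word at once, delimiters are emitted directly, so no pending-word string state is threaded through the loop.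
import Mathlib
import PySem

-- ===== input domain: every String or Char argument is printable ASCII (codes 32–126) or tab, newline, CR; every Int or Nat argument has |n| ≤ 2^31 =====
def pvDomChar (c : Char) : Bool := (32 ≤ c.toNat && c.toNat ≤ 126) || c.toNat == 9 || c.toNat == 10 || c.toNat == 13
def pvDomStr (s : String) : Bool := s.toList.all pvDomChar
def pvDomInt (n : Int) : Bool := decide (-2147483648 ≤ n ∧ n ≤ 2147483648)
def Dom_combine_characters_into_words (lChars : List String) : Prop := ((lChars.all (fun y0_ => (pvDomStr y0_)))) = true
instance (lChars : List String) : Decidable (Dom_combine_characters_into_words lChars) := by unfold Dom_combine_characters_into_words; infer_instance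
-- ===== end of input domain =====

-- B replaces A's pending-word accumulator state machine by a two-pointer scan over maximal
-- non-delimiter runs (idiomatic run-grouping); same O(n) cost, return value proved equal.

def lSingleCharacterSymbols : List String :=
  [",", ":", "(", ")", "'", "\"", "+", "&", "-", "*", "/", "<", ">", ";", "=", "[", "]", "?"]

-- ===== PORT A =====
-- loop body of A: state is (lReturn, sTemp)
def pvStepA (p : List String × String) (sChar : String) : List String × String :=
  if 1 < PySem.Str.len sChar then
    ((if p.2 ≠ "" then p.1 ++ [p.2] else p.1) ++ [sChar], "")
  else if sChar == " " then
    ((if p.2 ≠ "" then p.1 ++ [p.2] else p.1) ++ [sChar], "")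
  else if lSingleCharacterSymbols.contains sChar then
    ((if p.2 ≠ "" then p.1 ++ [p.2] else p.1) ++ [sChar], "")
  else
    (p.1, p.2 ++ sChar)

def combine_characters_into_words (lChars : List String) : List String :=
  let st := lChars.foldl pvStepA ([], "")
  if PySem.Str.len st.2 ≠ 0 then st.1 ++ [st.2] else st.1

-- ===== PORT B =====
def pvIsDelim (sChar : String) : Bool :=
  decide (1 < PySem.Str.len sChar) || sChar == " " || lSingleCharacterSymbols.contains sChar

-- outer while-loop of B: emit a delimiter, or join the maximal non-delimiter run into one word
def pvAltGo (l : List String) : List String :=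
  match l with
  | [] => []
  | c :: rest =>
    if pvIsDelim c then
      c :: pvAltGo rest
    else
      let word := PySem.Str.join "" ((c :: rest).takeWhile (fun s => !pvIsDelim s))
      (if word ≠ "" then [word] else []) ++ pvAltGo ((c :: rest).dropWhile (fun s => !pvIsDelim s))
  termination_by l.length
  decreasing_by
  · simp
  · have h1 : List.dropWhile (fun s => !pvIsDelim s) (c :: rest)
        = List.dropWhile (fun s => !pvIsDelim s) rest := by
      rw [List.dropWhile_cons_of_pos]; simpa using ‹¬ pvIsDelim c = true›
    have h2 := List.length_dropWhile_le (p := fun s => !pvIsDelim s) (l := rest)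
    simp only [h1, List.length_cons]
    omega

def combine_characters_into_words_alt (lChars : List String) : List String :=
  pvAltGo lChars

-- ===== PRECONDITION & SPEC =====
def Spec_combine_characters_into_words (lChars : List String) (out : List String) : Prop := out = combine_characters_into_words_alt lChars
instance (lChars : List String) (out : List String) : Decidable (Spec_combine_characters_into_words lChars out) := by unfold Spec_combine_characters_into_words; infer_instance

-- ===== CLAIM (what is proved, stated in full; the proofs are below) =====
def Claim_equal_combine_characters_into_words : Prop := ∀ (lChars : List String), Dom_combine_characters_into_words lChars → Spec_combine_characters_into_words lChars (combine_characters_into_words lChars)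

-- ===== LEMMAS AND PROOFS =====

theorem pvJoin_nil : PySem.Str.join "" [] = "" := by
  have h : (PySem.Str.join "" ([] : List String)).toList = ("" : String).toList := by
    simp [PySem.Str.join, PySem.Chars.join, List.intercalate]
  exact String.toList_injective h

theorem pvJoin_cons (c : String) (run : List String) :
    PySem.Str.join "" (c :: run) = c ++ PySem.Str.join "" run := by
  have h : (PySem.Str.join "" (c :: run)).toList = (c ++ PySem.Str.join "" run).toList := by
    cases run <;> simp [PySem.Str.join, PySem.Chars.join, List.intercalate]
  exact String.toList_injective h

-- A's step, phrased through B's delimiter predicate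
theorem pvStepA_eq (p : List String × String) (c : String) :
    pvStepA p c =
      if pvIsDelim c then ((if p.2 ≠ "" then p.1 ++ [p.2] else p.1) ++ [c], "")
      else (p.1, p.2 ++ c) := by
  by_cases h1 : 1 < c.length <;>
    by_cases h2 : c = " " <;>
      by_cases h3 : c ∈ lSingleCharacterSymbols <;>
        simp [pvStepA, pvIsDelim, PySem.Str.len_eq, h1, h2, h3]

-- recursive restatement of A's fold (proof helper)
def pvAGo : List String → String → List String
  | [], t => if t ≠ "" then [t] else []
  | c :: rest, t =>
    if pvIsDelim c then (if t ≠ "" then [t] else []) ++ c :: pvAGo rest ""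
    else pvAGo rest (t ++ c)

theorem pvFoldl_eq (l : List String) (R : List String) (t : String) :
    (if PySem.Str.len (List.foldl pvStepA (R, t) l).2 ≠ 0
      then (List.foldl pvStepA (R, t) l).1 ++ [(List.foldl pvStepA (R, t) l).2]
      else (List.foldl pvStepA (R, t) l).1) = R ++ pvAGo l t := by
  induction l generalizing R t with
  | nil =>
    simp only [List.foldl_nil, pvAGo, PySem.Str.len_eq]
    by_cases h : t = "" <;> simp [h, String.length_eq_zero_iff]
  | cons c rest ih =>
    simp only [List.foldl_cons, pvStepA_eq, pvAGo]
    by_cases hd : pvIsDelim c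
    · simp only [hd, if_pos]
      rw [ih]
      by_cases h : t = "" <;> simp [h]
    · simp only [hd, if_neg, Bool.false_eq_true, not_false_iff]
      rw [ih]

-- splitting off the first run/delimiter of pvAltGo (no induction needed)
theorem pvAlt_closed (l : List String) :
    (if PySem.Str.join "" (l.takeWhile (fun s => !pvIsDelim s)) ≠ ""
      then [PySem.Str.join "" (l.takeWhile (fun s => !pvIsDelim s))] else [])
      ++ pvAltGo (l.dropWhile (fun s => !pvIsDelim s)) = pvAltGo l := by
  match l with
  | [] => simp [pvAltGo, pvJoin_nil]
  | c :: rest =>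
    by_cases hd : pvIsDelim c
    · rw [List.takeWhile_cons_of_neg (by simp [hd]), List.dropWhile_cons_of_neg (by simp [hd])]
      simp [pvJoin_nil]
    · conv_rhs => rw [pvAltGo]
      simp [hd]

theorem pvAGo_eq (l : List String) (t : String) :
    pvAGo l t =
      (if (t ++ PySem.Str.join "" (l.takeWhile (fun s => !pvIsDelim s))) ≠ ""
        then [t ++ PySem.Str.join "" (l.takeWhile (fun s => !pvIsDelim s))] else [])
        ++ pvAltGo (l.dropWhile (fun s => !pvIsDelim s)) := by
  induction l generalizing t with
  | nil => simp [pvAGo, pvAltGo, pvJoin_nil]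
  | cons c rest ih =>
    by_cases hd : pvIsDelim c
    · have h0 : pvAGo rest "" = pvAltGo rest := by
        rw [ih ""]; simpa using pvAlt_closed rest
      rw [List.takeWhile_cons_of_neg (by simp [hd]), List.dropWhile_cons_of_neg (by simp [hd])]
      simp only [pvAGo, hd, if_pos, pvJoin_nil, h0]
      conv_rhs => rw [pvAltGo]
      simp [hd]
    · rw [List.takeWhile_cons_of_pos (by simp [hd]), List.dropWhile_cons_of_pos (by simp [hd])]
      simp only [pvAGo, hd, Bool.false_eq_true, if_neg, not_false_iff]
      rw [ih (t ++ c), pvJoin_cons]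
      simp [String.append_assoc]

-- ===== VERDICT (by name: the statement is the Claim_ definition above) =====
theorem combine_characters_into_words_spec : Claim_equal_combine_characters_into_words := by
  intro lChars _
  unfold Spec_combine_characters_into_words combine_characters_into_words combine_characters_into_words_alt
  show (if PySem.Str.len (List.foldl pvStepA ([], "") lChars).2 ≠ 0
      then (List.foldl pvStepA ([], "") lChars).1 ++ [(List.foldl pvStepA ([], "") lChars).2]
      else (List.foldl pvStepA ([], "") lChars).1) = pvAltGo lChars
  rw [pvFoldl_eq, pvAGo_eq]
  simpa using pvAlt_closed lChars
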